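-- pv_equiv track=rewrite | github.com/jordan-benjamin/buf | buf/unit.py | split_unit_quantity
-- ===== SOURCE A (Python) =====
-- def split_unit_quantity(string):
--     # TODO: look into settings to find default unit if not specified.
--     # TODO: handle bad inputs (no quantity or only ".")
--     # TODO: check for valid unit (have list of acceptable units)
--     quantity = ""
--     index = 0
--     quantity_characters = [str(num) for num in range(10)] + ["."]
--     for character in string:
--         if character in quantity_characters:
--             quantity+= character
--             index += 1
--         else:
--             break
--     symbol = string[index:]
--     return quantity, symbol
-- ===== SOURCE B (Python) =====
-- def split_unit_quantity(string):
--     symbol = string.lstrip("0123456789.")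
--     return string[:len(string) - len(symbol)], symbol
-- ===== Notes on version B (the rewrite author's own statement) =====
-- stated objective: simpler
-- what changed: Replaced the explicit character loop with running quantity/index accumulators by one str.lstrip call that removes the leading [0-9.] run, the quantity being the complementary prefix slice.
import Mathlib
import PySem

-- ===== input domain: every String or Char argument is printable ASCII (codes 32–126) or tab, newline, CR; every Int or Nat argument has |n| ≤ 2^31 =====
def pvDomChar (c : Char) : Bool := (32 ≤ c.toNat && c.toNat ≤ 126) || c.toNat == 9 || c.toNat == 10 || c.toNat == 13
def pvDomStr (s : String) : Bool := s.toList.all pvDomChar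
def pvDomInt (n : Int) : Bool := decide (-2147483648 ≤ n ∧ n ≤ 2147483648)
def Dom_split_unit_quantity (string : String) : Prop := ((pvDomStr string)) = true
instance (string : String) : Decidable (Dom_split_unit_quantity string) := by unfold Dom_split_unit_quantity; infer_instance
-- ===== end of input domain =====

-- B replaces A's explicit character loop (running quantity/index accumulators) by one
-- lstrip("0123456789.") call plus a complementary prefix slice; objective: simpler.


-- ===== PORT A =====
-- quantity_characters = [str(num) for num in range(10)] + ["."]
def pvQuantityChars : List String :=
  ((PySem.List.pyRange 0 10 1).map PySem.Int.toStr) ++ ["."]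

-- the for-loop with break: state (quantity, index)
def pvLoopA : List Char → String → Nat → String × Nat
  | [], quantity, index => (quantity, index)
  | character :: rest, quantity, index =>
    if String.singleton character ∈ pvQuantityChars then
      pvLoopA rest (quantity.push character) (index + 1)
    else
      (quantity, index)

def split_unit_quantity (string : String) : String × String :=
  let qi := pvLoopA string.toList "" 0
  let symbol := PySem.Str.slice string (some (qi.2 : Int)) none
  (qi.1, symbol)

-- ===== PORT B =====
def pvStripChars : List Char := "0123456789.".toList

def split_unit_quantity_alt (string : String) : String × String :=
  -- str.lstrip("0123456789.") ported by hand as dropWhile of membership in the char set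
  -- (exact: lstrip with an argument removes exactly the leading chars contained in it)
  let symbol := String.ofList (string.toList.dropWhile (fun c => c ∈ pvStripChars))
  -- string[:len(string) - len(symbol)]
  let quantity := PySem.Str.slice string none
    (some (PySem.Str.len string - PySem.Str.len symbol))
  (quantity, symbol)

-- ===== PRECONDITION & SPEC =====
def Spec_split_unit_quantity (string : String) (out : String × String) : Prop := out = split_unit_quantity_alt string
instance (string : String) (out : String × String) : Decidable (Spec_split_unit_quantity string out) := by unfold Spec_split_unit_quantity; infer_instance

-- ===== CLAIM (what is proved, stated in full; the proofs are below) =====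
def Claim_equal_split_unit_quantity : Prop := ∀ (string : String), Dom_split_unit_quantity string → Spec_split_unit_quantity string (split_unit_quantity string)

-- ===== LEMMAS AND PROOFS =====

-- A's membership test over 1-char strings is B's char-set membership
theorem pv_mem_iff (c : Char) :
    (String.singleton c ∈ pvQuantityChars) ↔ c ∈ pvStripChars := by
  have h : pvQuantityChars = ["0","1","2","3","4","5","6","7","8","9","."] := by decide
  rw [h]
  simp [pvStripChars, String.ext_iff, String.toList_singleton]

-- the loop returns the [0-9.]-prefix appended to the accumulator, and its length added to index
theorem pv_loopA_eq (cs : List Char) (q : String) (i : Nat) :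
    pvLoopA cs q i =
      (q ++ String.ofList (cs.takeWhile (fun c => c ∈ pvStripChars)),
       i + (cs.takeWhile (fun c => c ∈ pvStripChars)).length) := by
  induction cs generalizing q i with
  | nil => simp [pvLoopA]
  | cons c rest ih =>
    by_cases hc : c ∈ pvStripChars
    · rw [pvLoopA, if_pos ((pv_mem_iff c).mpr hc), ih]
      refine Prod.ext ?_ ?_
      · simp [String.ext_iff, hc]
      · simp [hc]; omega
    · rw [pvLoopA, if_neg (fun h => hc ((pv_mem_iff c).mp h))]
      simp [hc]

-- the complementary prefix slice is the takeWhile prefix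
theorem pv_take_eq (cs : List Char) (p : Char → Bool) :
    PySem.List.slice cs none (some ((cs.length : Int) - ((cs.dropWhile p).length : Int)))
      = cs.takeWhile p := by
  have h2 : cs.length = (cs.takeWhile p).length + (cs.dropWhile p).length := by
    have h3 := congrArg List.length (List.takeWhile_append_dropWhile (p := p) (l := cs))
    rw [List.length_append] at h3
    omega
  have h : (cs.length : Int) - ((cs.dropWhile p).length : Int)
      = (((cs.takeWhile p).length : Nat) : Int) := by omega
  rw [h, PySem.List.slice_to_natCast]
  nth_rewrite 2 [← List.takeWhile_append_dropWhile (p := p) (l := cs)]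
  exact List.take_left

-- ===== VERDICT (by name: the statement is the Claim_ definition above) =====
theorem split_unit_quantity_spec : Claim_equal_split_unit_quantity := by
  intro s _
  show split_unit_quantity s = split_unit_quantity_alt s
  unfold split_unit_quantity split_unit_quantity_alt
  rw [pv_loopA_eq]
  refine Prod.ext ?_ ?_
  · simp only [String.ext_iff, PySem.Str.slice, PySem.Str.len]
    simp only [String.toList_ofList, String.toList_append, String.toList_empty,
      List.nil_append, PySem.Chars.slice_eq_listSlice]
    exact (pv_take_eq s.toList _).symm
  · simp only [String.ext_iff, PySem.Str.slice]
    simp only [String.toList_ofList, PySem.Chars.slice_eq_listSlice,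
      PySem.List.slice_from_natCast]
    rw [Nat.zero_add]
    nth_rewrite 2 [← List.takeWhile_append_dropWhile
      (p := fun c => decide (c ∈ pvStripChars)) (l := s.toList)]
    exact List.drop_left
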